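-- pv_equiv track=rewrite | github.com/casperfibaek/buteo | lib/utils.py | divide_steps
-- ===== SOURCE A (Python) =====
-- def divide_steps(total, step):
--     steps = []
--     remainder = total % step
--     divided = int(total / step)
--     for cpu in range(step):
--         if remainder > 0:
--             steps.append(divided + 1)
--             remainder -= 1
--         else:
--             steps.append(divided)
--
--     return steps
-- ===== SOURCE B (Python) =====
-- def divide_steps(total, step):
--     divided = int(total / step)
--     remainder = total % step
--     bounds = [i * divided + min(i, remainder) for i in range(step + 1)]
--     return [b - a for a, b in zip(bounds, bounds[1:])]
-- ===== Notes on version B (the rewrite author's own statement) =====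
-- stated objective: alternative
-- what changed: Replaces A's per-slot loop with a decrementing remainder counter by a cumulative-boundaries algorithm: build the closed-form chunk boundaries i*divided + min(i, remainder) for i in 0..step, then take adjacent differences (zip with the shifted list).
import Mathlib
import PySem

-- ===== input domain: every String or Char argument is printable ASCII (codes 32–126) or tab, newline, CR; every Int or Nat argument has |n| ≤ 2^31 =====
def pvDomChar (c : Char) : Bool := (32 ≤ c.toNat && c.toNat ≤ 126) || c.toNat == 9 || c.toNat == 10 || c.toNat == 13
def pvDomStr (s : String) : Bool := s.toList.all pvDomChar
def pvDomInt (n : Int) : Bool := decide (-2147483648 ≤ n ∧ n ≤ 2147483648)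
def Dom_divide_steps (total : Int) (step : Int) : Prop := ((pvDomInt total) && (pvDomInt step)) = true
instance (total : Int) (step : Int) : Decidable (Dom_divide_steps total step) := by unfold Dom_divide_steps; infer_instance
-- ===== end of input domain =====

-- B computes the chunks as adjacent differences of closed-form cumulative boundaries
-- i*divided + min(i, remainder), instead of A's per-slot loop decrementing a remainder counter;
-- same O(step) cost, a different algorithm (boundaries-then-diff).


-- ===== PORT A =====
-- int(total / step): Python float division then truncation toward zero; on Dom (|total| ≤ 2^31 < 2^53)
-- the correctly-rounded double quotient truncates to the same integer as the exact quotient, i.e. Int.tdiv.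
def divide_steps (total : Int) (step : Int) : List Int :=
  let remainder := PySem.Int.mod total step
  let divided := Int.tdiv total step
  ((PySem.List.pyRange 0 step 1).foldl
    (fun (st : List Int × Int) _ =>
      if st.2 > 0 then (st.1 ++ [divided + 1], st.2 - 1) else (st.1 ++ [divided], st.2))
    ([], remainder)).1

-- ===== PORT B =====
-- bounds[1:] ported as PySem.List.slice bounds (some 1) none; zip is List.zip.
def divide_steps_alt (total : Int) (step : Int) : List Int :=
  let divided := Int.tdiv total step
  let remainder := PySem.Int.mod total step
  let bounds := (PySem.List.pyRange 0 (step + 1) 1).map (fun i => i * divided + min i remainder)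
  (bounds.zip (PySem.List.slice bounds (some 1) none)).map (fun p => p.2 - p.1)

-- ===== PRECONDITION & SPEC =====
-- step = 0 makes Python's 'total % step' raise ZeroDivisionError.
def Pre_divide_steps (total : Int) (step : Int) : Prop := step ≠ 0
instance (total : Int) (step : Int) : Decidable (Pre_divide_steps total step) := by unfold Pre_divide_steps; infer_instance
def pvWitness_divide_steps : Int × Int := (7, 3)
def Spec_divide_steps (total : Int) (step : Int) (out : List Int) : Prop := out = divide_steps_alt total step
instance (total : Int) (step : Int) (out : List Int) : Decidable (Spec_divide_steps total step out) := by unfold Spec_divide_steps; infer_instance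

-- ===== CLAIM =====
def Claim_equal_divide_steps : Prop := ∀ (total : Int) (step : Int), Dom_divide_steps total step → Pre_divide_steps total step → Spec_divide_steps total step (divide_steps total step)

-- ===== LEMMAS AND PROOFS =====

-- A's loop appends remainder copies of d+1, then d for the rest.
lemma divide_steps_loop (d : Int) :
    ∀ (l : List Int) (r : Int) (acc : List Int), 0 ≤ r → r.toNat ≤ l.length →
    (l.foldl
      (fun (st : List Int × Int) _ =>
        if st.2 > 0 then (st.1 ++ [d + 1], st.2 - 1) else (st.1 ++ [d], st.2))
      (acc, r)).1
    = acc ++ List.replicate r.toNat (d + 1) ++ List.replicate (l.length - r.toNat) d := by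
  intro l
  induction l with
  | nil =>
    intro r acc h0 hle
    simp at hle ⊢
    exact hle
  | cons a l ih =>
    intro r acc h0 hle
    by_cases hr : r > 0
    · simp only [List.foldl_cons, if_pos hr]
      rw [ih (r - 1) (acc ++ [d + 1]) (by omega) (by simp at hle ⊢; omega)]
      have h1 : r.toNat = (r - 1).toNat + 1 := by omega
      have h2 : (a :: l).length - ((r - 1).toNat + 1) = l.length - (r - 1).toNat := by simp
      rw [h1, h2, List.replicate_succ]
      simp
    · have hr0 : r = 0 := by omega
      subst hr0
      simp only [List.foldl_cons, if_neg hr]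
      rw [ih 0 (acc ++ [d]) le_rfl (by simp)]
      simp [List.replicate_succ]

-- adjacent differences of (map g (range (n+1))) are the n forward differences of g
lemma diffs_of_map_range (n : Nat) (g : Nat → Int) :
    ((((List.range (n+1)).map g).zip (((List.range (n+1)).map g).drop 1)).map
      (fun p : Int × Int => p.2 - p.1))
    = (List.range n).map (fun i => g (i+1) - g i) := by
  apply List.ext_getElem
  · simp
  · intro i h1 h2
    simp

-- the forward-difference list of an ite step profile is two replicate blocks
lemma map_ite_range (d : Int) :
    ∀ (n rn : Nat), rn ≤ n →
    (List.range n).map (fun i => if i < rn then d + 1 else d)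
    = List.replicate rn (d + 1) ++ List.replicate (n - rn) d := by
  intro n
  induction n with
  | zero => intro rn h; interval_cases rn; simp
  | succ n ih =>
    intro rn h
    rw [List.range_succ_eq_map, List.map_cons, List.map_map]
    match rn with
    | 0 =>
      simp only [Nat.not_lt_zero, if_false]
      simp [Function.comp_def, List.map_const', List.replicate_succ]
    | rn + 1 =>
      simp only [Nat.zero_lt_succ, if_true]
      rw [show ((fun i => if i < rn + 1 then d + 1 else d) ∘ Nat.succ)
            = fun (i : Nat) => if i < rn then d + 1 else d from by
        funext i; simp]
      rw [ih rn (by omega)]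
      simp [List.replicate_succ]

-- ===== VERDICT =====

theorem divide_steps_spec : Claim_equal_divide_steps := by
  intro total step _ hpre
  unfold Spec_divide_steps divide_steps divide_steps_alt
  simp only []
  set r := PySem.Int.mod total step with hrdef
  set d := Int.tdiv total step
  rcases lt_or_gt_of_ne hpre with hneg | hpos
  · -- step < 0: range(step) is empty on the A side, range(step+1) empty on the B side
    rw [PySem.List.pyRange_one_eq_nil (a := 0) (b := step) (by omega),
        PySem.List.pyRange_one_eq_nil (a := 0) (b := step + 1) (by omega)]
    simp
  · have h0 : (0 : Int) ≤ r := PySem.Int.mod_nonneg total hpos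
    have hlt : r < step := PySem.Int.mod_lt total hpos
    -- A side
    have hlenA : (PySem.List.pyRange 0 step 1).length = step.toNat := by
      rw [PySem.List.length_pyRange_one]; simp
    rw [divide_steps_loop d (PySem.List.pyRange 0 step 1) r [] h0 (by omega), hlenA]
    -- B side
    rw [PySem.List.slice_from_one, ← List.drop_one,
        PySem.List.pyRange_one (a := 0) (b := step + 1), List.map_map]
    have hn : (step + 1 - 0).toNat = step.toNat + 1 := by omega
    rw [hn, diffs_of_map_range step.toNat
      ((fun i => i * d + min i r) ∘ fun k : Nat => 0 + (k : Int))]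
    have hpt : ∀ i : Nat,
        ((fun i => i * d + min i r) ∘ fun k : Nat => 0 + (k : Int)) (i + 1)
          - ((fun i => i * d + min i r) ∘ fun k : Nat => 0 + (k : Int)) i
        = if i < r.toNat then d + 1 else d := by
      intro i
      simp only [Function.comp]
      push_cast
      by_cases hi : i < r.toNat
      · rw [if_pos hi]
        have : min ((0:Int) + (i+1)) r = (0:Int) + (i+1) := by omega
        have h2 : min ((0:Int) + i) r = (0:Int) + i := by omega
        rw [this, h2]; ring
      · rw [if_neg hi]
        have : min ((0:Int) + (i+1)) r = r := by omega
        have h2 : min ((0:Int) + i) r = r := by omega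
        rw [this, h2]; ring
    rw [List.map_congr_left (fun i _ => hpt i)]
    rw [map_ite_range d step.toNat r.toNat (by omega)]
    simp
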